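-- pv_equiv track=rewrite | github.com/qcqced123/commonlit_ess | dataset_class/preprocessing.py | adjust_sequences
-- ===== SOURCE A (Python) =====
-- def adjust_sequences(sequences: list, max_len: int):
--     """
--     Similar to dynamic padding concept
--     Append slicing index from original, because original source code is implemented weired
--     So it generates some problem for applying very longer sequence
--     Add -1 value to slicing index, so we can get result what we want
--     Args:
--         sequences: list of each cell's token sequence in one unique notebook id, must pass tokenized sequence input_ids
--         => sequences = [[1,2,3,4,5,6], [1,2,3,4,5,6], ... , [1,2,3,4,5]]
--         max_len: max length of sequence into LLM Embedding Layer, default is 2048 for DeBERTa-V3-Large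
--     Reference:
--          https://github.com/louis-she/ai4code/blob/master/ai4code/utils.py#L70
--     """
--     length_of_seqs = [len(seq) for seq in sequences]
--     total_len = sum(length_of_seqs)
--     cut_off = total_len - max_len
--     if cut_off <= 0:
--         return sequences, length_of_seqs
--
--     for _ in range(cut_off):
--         max_index = length_of_seqs.index(max(length_of_seqs))
--         length_of_seqs[max_index] -= 1
--     sequences = [sequences[i][:l-1] for i, l in enumerate(length_of_seqs)]
--     return sequences, length_of_seqs
-- ===== SOURCE B (Python) =====
-- def adjust_sequences(sequences: list, max_len: int):
--     """Water-filling: compute the final level in closed form instead of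
--     decrementing the maximum one token at a time."""
--     lengths = [len(seq) for seq in sequences]
--     total_len = sum(lengths)
--     cut_off = total_len - max_len
--     if cut_off <= 0:
--         return sequences, lengths
--
--     # level = smallest L with sum(max(l - L, 0)) <= cut_off
--     #       = max over j of ceil((P_j - cut_off) / j), P_j = sum of j largest lengths
--     desc = sorted(lengths, reverse=True)
--     level = None
--     prefix = 0
--     j = 0
--     for v in desc:
--         j += 1
--         prefix += v
--         cand = -((cut_off - prefix) // j)  # ceil((prefix - cut_off) / j)
--         if level is None or cand > level:
--             level = cand
--     # leftover decrements below the level, applied to the earliest long sequences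
--     r = sum(min(l, level) for l in lengths) - max_len
--     new_lengths = []
--     for l in lengths:
--         if l >= level and r > 0:
--             new_lengths.append(level - 1)
--             r -= 1
--         elif l >= level:
--             new_lengths.append(level)
--         else:
--             new_lengths.append(l)
--     sequences = [sequences[i][:l - 1] for i, l in enumerate(new_lengths)]
--     return sequences, new_lengths
-- ===== Notes on version B (the rewrite author's own statement) =====
-- stated objective: faster
-- what changed: Replaces A's cut_off-iteration decrement-the-current-maximum loop by a closed-form water-filling computation: sort the lengths descending, obtain the threshold level as a maximum of prefix-sum ceiling divisions, then build the trimmed lengths in one pass.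
import Mathlib
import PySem

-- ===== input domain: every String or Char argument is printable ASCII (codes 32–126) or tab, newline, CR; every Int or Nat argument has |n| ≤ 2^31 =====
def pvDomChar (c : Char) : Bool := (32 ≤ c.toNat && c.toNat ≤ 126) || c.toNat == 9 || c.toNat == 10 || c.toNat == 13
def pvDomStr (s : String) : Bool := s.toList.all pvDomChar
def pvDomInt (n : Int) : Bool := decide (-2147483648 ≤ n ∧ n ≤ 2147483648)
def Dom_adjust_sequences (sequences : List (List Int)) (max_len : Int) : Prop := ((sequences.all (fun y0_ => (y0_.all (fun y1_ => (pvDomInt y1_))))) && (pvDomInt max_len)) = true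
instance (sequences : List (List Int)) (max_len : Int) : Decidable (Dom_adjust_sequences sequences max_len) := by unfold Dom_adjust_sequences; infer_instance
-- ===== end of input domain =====

-- B replaces A's one-token-at-a-time decrement loop by a closed-form water-filling level
-- (sort descending + prefix-sum ceiling divisions), for speed; return value only, no mutation.

-- ===== PORT A =====
-- loop body of A's 'for _ in range(cut_off)': max_index = lens.index(max(lens)); lens[max_index] -= 1
def aStep (ls : List Int) : List Int :=
  match PySem.List.max? ls (fun y => y) with
  | none => ls          -- max([]) raises ValueError in Python: excluded by Pre_
  | some m =>
    match PySem.List.index? ls m with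
    | none => ls        -- unreachable: m ∈ ls
    | some i => PySem.List.pySetD ls (i : Int) (PySem.List.pyGetD ls (i : Int) 0 - 1)

def adjust_sequences (sequences : List (List Int)) (max_len : Int) : List (List Int) × List Int :=
  let length_of_seqs := sequences.map (fun seq => (seq.length : Int))
  let total_len := length_of_seqs.sum
  let cut_off := total_len - max_len
  if cut_off ≤ 0 then (sequences, length_of_seqs)
  else
    let final := (PySem.List.pyRange 0 cut_off 1).foldl (fun ls _ => aStep ls) length_of_seqs
    let seqs' := (PySem.List.enumerate final).map (fun il =>
      PySem.List.slice (PySem.List.pyGetD sequences il.1 []) none (some (il.2 - 1)))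
    (seqs', final)

-- ===== PORT B =====
-- one step of B's level-search fold: j += 1; prefix += v; cand = -((cut_off - prefix) // j); keep the max
def bStep (cut_off : Int) (st : Int × Int × Option Int) (v : Int) : Int × Int × Option Int :=
  let j := st.1 + 1
  let pre := st.2.1 + v
  let cand := -(PySem.Int.floordiv (cut_off - pre) j)
  match st.2.2 with
  | none => (j, pre, some cand)
  | some L => if cand > L then (j, pre, some cand) else (j, pre, some L)

-- B's final pass: l >= level and r > 0 → level-1 (consume one r); l >= level → level; else l
def wfPass (level r : Int) : List Int → List Int
  | [] => []
  | l :: t =>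
    if level ≤ l ∧ 0 < r then (level - 1) :: wfPass level (r - 1) t
    else if level ≤ l then level :: wfPass level r t
    else l :: wfPass level r t

def adjust_sequences_alt (sequences : List (List Int)) (max_len : Int) : List (List Int) × List Int :=
  let lengths := sequences.map (fun seq => (seq.length : Int))
  let total_len := lengths.sum
  let cut_off := total_len - max_len
  if cut_off ≤ 0 then (sequences, lengths)
  else
    let desc := PySem.List.sorted lengths (fun x => x) true
    let st := desc.foldl (bStep cut_off) (0, 0, none)
    match st.2.2 with
    | none => ([], [])  -- level is None ⟺ lengths = []: every remaining Python loop runs zero times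
    | some level =>
      let r := (lengths.map (fun l => min l level)).sum - max_len
      let new_lengths := wfPass level r lengths
      let seqs' := (PySem.List.enumerate new_lengths).map (fun il =>
        PySem.List.slice (PySem.List.pyGetD sequences il.1 []) none (some (il.2 - 1)))
      (seqs', new_lengths)

-- ===== PRECONDITION & SPEC =====
-- Pre_ excludes only sequences = [] with max_len < 0, where A's max([]) raises ValueError.
def Pre_adjust_sequences (sequences : List (List Int)) (max_len : Int) : Prop :=
  sequences = [] → 0 ≤ max_len
instance (sequences : List (List Int)) (max_len : Int) : Decidable (Pre_adjust_sequences sequences max_len) := by unfold Pre_adjust_sequences; infer_instance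

def pvWitness_adjust_sequences : List (List Int) × Int := ([[1, 2, 3], [4, 5]], 3)

def Spec_adjust_sequences (sequences : List (List Int)) (max_len : Int) (out : List (List Int) × List Int) : Prop := out = adjust_sequences_alt sequences max_len
instance (sequences : List (List Int)) (max_len : Int) (out : List (List Int) × List Int) : Decidable (Spec_adjust_sequences sequences max_len out) := by unfold Spec_adjust_sequences; infer_instance

-- ===== CLAIM (what is proved, stated in full; the proofs are below) =====
def Claim_equal_adjust_sequences : Prop := ∀ (sequences : List (List Int)) (max_len : Int), Dom_adjust_sequences sequences max_len → Pre_adjust_sequences sequences max_len → Spec_adjust_sequences sequences max_len (adjust_sequences sequences max_len)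

-- ===== LEMMAS AND PROOFS =====

-- number of entries ≥ L
def cntGe (L : Int) (ls : List Int) : Nat := ls.countP (fun l => decide (L ≤ l))
-- sum of the lengths capped at L
def capSum (L : Int) (ls : List Int) : Int := (ls.map (fun l => min l L)).sum
-- excess above level L
def dSum (L : Int) (ls : List Int) : Int := (ls.map (fun l => max (l - L) 0)).sum
-- decrement the first occurrence of v
def decFirst (v : Int) : List Int → List Int
  | [] => []
  | x :: t => if x = v then (v - 1) :: t else x :: decFirst v t

theorem capSum_sub (L : Int) (ls : List Int) :
    capSum L ls = capSum (L - 1) ls + cntGe L ls := by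
  induction ls with
  | nil => simp [capSum, cntGe]
  | cons l t ih =>
    simp only [capSum, cntGe, List.map_cons, List.sum_cons, List.countP_cons] at *
    by_cases h : L ≤ l <;> simp [h] <;> push_cast <;> omega

theorem capSum_mono {L' L : Int} (h : L' ≤ L) (ls : List Int) : capSum L' ls ≤ capSum L ls := by
  induction ls with
  | nil => simp [capSum]
  | cons l t ih =>
    simp only [capSum, List.map_cons, List.sum_cons] at *
    have : min l L' ≤ min l L := by omega
    omega

theorem capSum_eq_sum {L : Int} {ls : List Int} (h : ∀ l ∈ ls, l ≤ L) : capSum L ls = ls.sum := by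
  induction ls with
  | nil => simp [capSum]
  | cons l t ih =>
    simp only [capSum, List.map_cons, List.sum_cons] at *
    have h1 := h l (by simp)
    have h2 : capSum L t = t.sum := ih (fun x hx => h x (by simp [hx]))
    simp only [capSum] at h2
    omega

theorem cntGe_mono {L' L : Int} (h : L' ≤ L) (ls : List Int) : cntGe L ls ≤ cntGe L' ls := by
  unfold cntGe
  apply List.countP_mono_left
  intro x _ hx
  simp at hx ⊢
  omega

theorem wfPass_zero_eq {L : Int} {ls : List Int} (h : ∀ l ∈ ls, l ≤ L) : wfPass L 0 ls = ls := by
  induction ls with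
  | nil => simp [wfPass]
  | cons l t ih =>
    have h1 := h l (by simp)
    simp only [wfPass]
    split_ifs with hif hif2
    · omega
    · have hLl : L = l := le_antisymm hif2 h1
      subst hLl
      rw [ih (fun x hx => h x (by simp [hx]))]
    · rw [ih (fun x hx => h x (by simp [hx]))]

theorem wfPass_rollover {L r : Int} {ls : List Int} (h : (cntGe L ls : Int) ≤ r) :
    wfPass L r ls = wfPass (L - 1) 0 ls := by
  induction ls generalizing r with
  | nil => simp [wfPass]
  | cons l t ih =>
    simp only [cntGe, List.countP_cons] at h
    by_cases hl : L ≤ l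
    · have hcnt : (cntGe L t : Int) + 1 ≤ r := by
        simp only [cntGe]
        simp only [hl, decide_true, if_true] at h
        push_cast at h
        push_cast
        omega
      have hr : 0 < r := by
        have h0 : (0:Int) ≤ (cntGe L t : Int) := by positivity
        omega
      have hbr1 : ¬ (L - 1 ≤ l ∧ (0:Int) < 0) := fun hh => by omega
      have hbr2 : L - 1 ≤ l := by omega
      simp only [wfPass, if_pos (And.intro hl hr), if_neg hbr1, if_pos hbr2]
      rw [ih (by omega)]
    · have hcnt : (cntGe L t : Int) ≤ r := by
        simp only [cntGe]
        simp only [hl, decide_false] at h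
        exact_mod_cast h
      have hb1 : ¬ (L ≤ l ∧ 0 < r) := fun hh => hl hh.1
      have hb2 : ¬ (L - 1 ≤ l ∧ (0:Int) < 0) := fun hh => by omega
      by_cases hll : L - 1 ≤ l
      · have heq : l = L - 1 := by omega
        simp only [wfPass, if_neg hb1, if_neg hl, if_neg hb2, if_pos hll]
        rw [ih hcnt, heq]
      · simp only [wfPass, if_neg hb1, if_neg hl, if_neg hb2, if_neg hll]
        rw [ih hcnt]

theorem mem_wfPass_le {L r x : Int} {ls : List Int} (hx : x ∈ wfPass L r ls) : x ≤ L := by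
  induction ls generalizing r with
  | nil => simp [wfPass] at hx
  | cons l t ih =>
    simp only [wfPass] at hx
    split_ifs at hx with h1 h2
    · rcases List.mem_cons.mp hx with h | h
      · omega
      · exact ih h
    · rcases List.mem_cons.mp hx with h | h
      · omega
      · exact ih h
    · rcases List.mem_cons.mp hx with h | h
      · omega
      · exact ih h

theorem mem_L_wfPass {L r : Int} {ls : List Int} (h0 : 0 ≤ r) (h1 : r < (cntGe L ls : Int)) :
    L ∈ wfPass L r ls := by
  induction ls generalizing r with
  | nil => simp [cntGe] at h1; omega
  | cons l t ih =>
    simp only [cntGe, List.countP_cons] at h1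
    by_cases hl : L ≤ l
    · simp only [hl, decide_true, if_true] at h1
      by_cases hr : 0 < r
      · simp only [wfPass, if_pos (And.intro hl hr)]
        refine List.mem_cons_of_mem _ (ih (by omega) ?_)
        simp only [cntGe]
        push_cast at h1 ⊢
        omega
      · have hr0 : r = 0 := by omega
        subst hr0
        have hb : ¬ (L ≤ l ∧ (0:Int) < 0) := fun hh => by omega
        simp only [wfPass, if_neg hb, if_pos hl]
        exact List.mem_cons_self
    · simp only [hl, decide_false] at h1
      have hb1 : ¬ (L ≤ l ∧ 0 < r) := fun hh => hl hh.1
      simp only [wfPass, if_neg hb1, if_neg hl]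
      refine List.mem_cons_of_mem _ (ih h0 ?_)
      simp only [cntGe]
      exact h1

theorem decFirst_wfPass {L r : Int} {ls : List Int} (h0 : 0 ≤ r) (h1 : r < (cntGe L ls : Int)) :
    decFirst L (wfPass L r ls) = wfPass L (r + 1) ls := by
  induction ls generalizing r with
  | nil => simp [cntGe] at h1; omega
  | cons l t ih =>
    simp only [cntGe, List.countP_cons] at h1
    by_cases hl : L ≤ l
    · simp only [hl, decide_true, if_true] at h1
      by_cases hr : 0 < r
      · have hrt : r - 1 < (cntGe L t : Int) := by
          simp only [cntGe]
          push_cast at h1 ⊢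
          omega
        simp only [wfPass, if_pos (And.intro hl hr),
          if_pos (And.intro hl (show (0:Int) < r + 1 by omega))]
        simp only [decFirst, if_neg (show ¬ (L - 1 = L) by omega)]
        rw [ih (by omega) hrt]
        have : r - 1 + 1 = r + 1 - 1 := by ring
        rw [this]
      · have hr0 : r = 0 := by omega
        subst hr0
        have hb : ¬ (L ≤ l ∧ (0:Int) < 0) := fun hh => by omega
        simp only [wfPass, if_neg hb, if_pos hl,
          if_pos (And.intro hl (show (0:Int) < 0 + 1 by omega))]
        simp only [decFirst, if_true, reduceIte]
        norm_num
    · simp only [hl, decide_false] at h1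
      have hb1 : ¬ (L ≤ l ∧ 0 < r) := fun hh => hl hh.1
      have hb2 : ¬ (L ≤ l ∧ (0:Int) < r + 1) := fun hh => hl hh.1
      simp only [wfPass, if_neg hb1, if_neg hl, if_neg hb2]
      simp only [decFirst, if_neg (show ¬ (l = L) by omega)]
      rw [ih h0 (by simp only [cntGe]; exact h1)]

theorem aStep_core {L : Int} {c : List Int} (hmem : L ∈ c) :
    (match PySem.List.index? c L with
     | none => c
     | some i => PySem.List.pySetD c (i : Int) (PySem.List.pyGetD c (i : Int) 0 - 1)) = decFirst L c := by
  induction c with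
  | nil => simp at hmem
  | cons x t ih =>
    by_cases hx : x = L
    · subst hx
      rw [PySem.List.index?_cons_self]
      simp [PySem.List.pyGetD_zero_cons, PySem.List.pySetD_of_nonneg, decFirst]
    · have hmt : L ∈ t := by
        rcases List.mem_cons.mp hmem with h | h
        · exact absurd h.symm hx
        · exact h
      obtain ⟨i, hi⟩ : ∃ i, PySem.List.index? t L = some i :=
        Option.isSome_iff_exists.mp (Iff.mpr (PySem.List.index?_isSome_iff t L) hmt)
      have hih := ih hmt
      rw [hi] at hih
      rw [PySem.List.index?_cons_of_ne t hx, hi]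
      simp only [Option.map_some, decFirst, if_neg hx]
      rw [PySem.List.pySetD_natCast, PySem.List.pyGetD_natCast]
      simp only [PySem.List.pySetD_natCast, PySem.List.pyGetD_natCast] at hih
      have hset : (x :: t).set (i + 1) ((x :: t).getD (i + 1) 0 - 1) =
          x :: t.set i (t.getD i 0 - 1) := by
        simp [List.getD_cons_succ]
      rw [hset, hih]

theorem aStep_eq_decFirst {L : Int} {c : List Int} (hmem : L ∈ c) (hmax : ∀ x ∈ c, x ≤ L) :
    aStep c = decFirst L c := by
  have hne : c ≠ [] := by intro h; subst h; simp at hmem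
  obtain ⟨m, hm⟩ : ∃ m, PySem.List.max? c (fun y => y) = some m := by
    cases h : PySem.List.max? c (fun y => y) with
    | none => exact absurd ((PySem.List.max?_eq_none_iff c (fun y => y)).mp h) hne
    | some m => exact ⟨m, rfl⟩
  have hmm : m ∈ c := PySem.List.max?_mem hm
  have hmx := PySem.List.max?_isMax hm
  have hmL : m = L := le_antisymm (hmax m hmm) (hmx L hmem)
  subst hmL
  unfold aStep
  rw [hm]
  exact aStep_core hmm

theorem aStep_wfPass {L r : Int} {ls : List Int} (h0 : 0 ≤ r) (h1 : r < (cntGe L ls : Int)) :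
    aStep (wfPass L r ls) = wfPass L (r + 1) ls := by
  rw [aStep_eq_decFirst (mem_L_wfPass h0 h1) (fun x hx => mem_wfPass_le hx)]
  exact decFirst_wfPass h0 h1

theorem foldl_ignore {α β : Type} (f : α → α) (l : List β) (init : α) :
    l.foldl (fun s _ => f s) init = f^[l.length] init := by
  induction l generalizing init with
  | nil => rfl
  | cons x t ih =>
    simp only [List.foldl_cons, List.length_cons, ih, Function.iterate_succ_apply]

theorem iterate_wf (ls : List Int) (hne : ls ≠ []) (k : Nat) :
    ∃ L r, 0 ≤ r ∧ r < (cntGe L ls : Int) ∧ capSum L ls - r = ls.sum - k ∧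
      aStep^[k] ls = wfPass L r ls := by
  induction k with
  | zero =>
    obtain ⟨M, hM⟩ : ∃ M, PySem.List.max? ls (fun y => y) = some M := by
      cases h : PySem.List.max? ls (fun y => y) with
      | none => exact absurd ((PySem.List.max?_eq_none_iff ls (fun y => y)).mp h) hne
      | some m => exact ⟨m, rfl⟩
    have hmm : M ∈ ls := PySem.List.max?_mem hM
    have hmx := PySem.List.max?_isMax hM
    refine ⟨M, 0, le_refl 0, ?_, ?_, ?_⟩
    · have hpos : 0 < cntGe M ls := by
        unfold cntGe
        exact List.countP_pos_iff.mpr ⟨M, hmm, by simp⟩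
      exact_mod_cast hpos
    · rw [capSum_eq_sum (fun x hx => hmx x hx)]; simp
    · simp [wfPass_zero_eq (fun x hx => hmx x hx)]
  | succ k ih =>
    obtain ⟨L, r, h0, h1, hsum, hit⟩ := ih
    by_cases hc : r + 1 < (cntGe L ls : Int)
    · refine ⟨L, r + 1, by omega, hc, by push_cast at hsum ⊢; omega, ?_⟩
      rw [Function.iterate_succ_apply', hit, aStep_wfPass h0 h1]
    · have hr1 : r + 1 = (cntGe L ls : Int) := by omega
      have hmono := cntGe_mono (by omega : L - 1 ≤ L) ls
      have hsub := capSum_sub L ls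
      refine ⟨L - 1, 0, le_refl 0, ?_, ?_, ?_⟩
      · push_cast at *; omega
      · push_cast at *; omega
      · rw [Function.iterate_succ_apply', hit, aStep_wfPass h0 h1, wfPass_rollover (by omega)]

theorem wf_unique {L r L' r' : Int} {ls : List Int}
    (h0 : 0 ≤ r) (h1 : r < (cntGe L ls : Int)) (h0' : 0 ≤ r') (h1' : r' < (cntGe L' ls : Int))
    (hsum : capSum L ls - r = capSum L' ls - r') : L = L' ∧ r = r' := by
  have key : ∀ (A B a b : Int) (lsx : List Int), A < B → 0 ≤ a → a < (cntGe A lsx : Int) →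
      0 ≤ b → b < (cntGe B lsx : Int) → capSum A lsx - a < capSum B lsx - b := by
    intro A B a b lsx hAB ha0 ha1 hb0 hb1
    have hmono := capSum_mono (by omega : A ≤ B - 1) lsx
    have hsub := capSum_sub B lsx
    omega
  rcases lt_trichotomy L L' with h | h | h
  · exact absurd hsum (by have := key L L' r r' ls h h0 h1 h0' h1'; omega)
  · subst h; exact ⟨rfl, by omega⟩
  · exact absurd hsum (by have := key L' L r' r ls h h0' h1' h0 h1; omega)

theorem dSum_add_capSum (L : Int) (ls : List Int) : dSum L ls + capSum L ls = ls.sum := by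
  induction ls with
  | nil => simp [dSum, capSum]
  | cons l t ih =>
    simp only [dSum, capSum, List.map_cons, List.sum_cons] at *
    omega

theorem dSum_perm {ls ls' : List Int} (h : ls.Perm ls') (L : Int) : dSum L ls = dSum L ls' := by
  exact (h.map (fun l => max (l - L) 0)).sum_eq

theorem dSum_nonneg (L : Int) (ls : List Int) : 0 ≤ dSum L ls := by
  apply List.sum_nonneg
  intro x hx
  obtain ⟨l, _, rfl⟩ := List.mem_map.mp hx
  exact le_max_right _ 0

theorem dSum_ge (L : Int) (xs : List Int) : xs.sum - (xs.length : Int) * L ≤ dSum L xs := by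
  induction xs with
  | nil => simp [dSum]
  | cons l t ih =>
    simp only [dSum, List.map_cons, List.sum_cons, List.length_cons] at *
    have h1 := le_max_left (l - L) 0
    push_cast
    linarith

theorem dSum_lower {L : Int} {s : List Int} {j : Nat} (hj : j ≤ s.length) :
    (s.take j).sum - (j : Int) * L ≤ dSum L s := by
  have hsplit : dSum L s = dSum L (s.take j) + dSum L (s.drop j) := by
    unfold dSum
    conv_lhs => rw [← List.take_append_drop j s]
    rw [List.map_append, List.sum_append]
  have h2 := dSum_nonneg L (s.drop j)
  have h3 := dSum_ge L (s.take j)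
  have hlen : ((s.take j).length : Int) = j := by
    rw [List.length_take]; omega
  rw [hlen] at h3
  linarith

theorem dSum_eq_zero {L : Int} {s : List Int} (h : ∀ x ∈ s, x ≤ L) : dSum L s = 0 := by
  induction s with
  | nil => simp [dSum]
  | cons a t ih =>
    simp only [dSum, List.map_cons, List.sum_cons] at *
    have h1 := h a (by simp)
    have h2 : dSum L t = 0 := ih (fun x hx => h x (by simp [hx]))
    simp only [dSum] at h2
    omega

theorem dSum_upper (L : Int) {s : List Int} (hs : s.Pairwise (fun a b => b ≤ a)) :
    ∃ j : Nat, j ≤ s.length ∧ dSum L s = (s.take j).sum - (j : Int) * L := by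
  induction s with
  | nil => exact ⟨0, by simp [dSum]⟩
  | cons a t ih =>
    rcases List.pairwise_cons.mp hs with ⟨ha, ht⟩
    by_cases hL : L < a
    · obtain ⟨j, hj, he⟩ := ih ht
      refine ⟨j + 1, by simpa using hj, ?_⟩
      simp only [dSum, List.map_cons, List.sum_cons, List.take_succ_cons] at *
      have hmax : max (a - L) 0 = a - L := max_eq_left (by omega)
      push_cast
      rw [hmax, he]
      ring
    · refine ⟨0, Nat.zero_le _, ?_⟩
      simp only [List.take_zero, List.sum_nil, Nat.cast_zero, zero_mul, sub_zero]
      exact dSum_eq_zero (by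
        intro x hx
        rcases List.mem_cons.mp hx with h | h
        · omega
        · exact le_trans (ha x h) (by omega))

-- ceiling-division bracket: -((cut - p) // j) is the least q with p - cut ≤ q*j
theorem cand_bracket {p cut : Int} {j : Int} (hj : 0 < j) :
    (-(PySem.Int.floordiv (cut - p) j) - 1) * j < p - cut ∧
      p - cut ≤ -(PySem.Int.floordiv (cut - p) j) * j := by
  have harg : cut - p = -(p - cut) := by ring
  rw [harg]
  exact (PySem.Int.neg_floordiv_neg_eq_iff_of_pos hj).mp rfl

theorem bFold_spec (cut : Int) (s : List Int) (j0 p0 L0 : Int) :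
    ∃ L, s.foldl (bStep cut) (j0, p0, some L0) = (j0 + s.length, p0 + s.sum, some L) ∧
      L0 ≤ L ∧
      (∀ i : Nat, i < s.length →
        -(PySem.Int.floordiv (cut - (p0 + (s.take (i + 1)).sum)) (j0 + i + 1)) ≤ L) ∧
      (L = L0 ∨ ∃ i : Nat, i < s.length ∧
        L = -(PySem.Int.floordiv (cut - (p0 + (s.take (i + 1)).sum)) (j0 + i + 1))) := by
  induction s generalizing j0 p0 L0 with
  | nil =>
    refine ⟨L0, by simp, le_refl _, by simp, Or.inl rfl⟩
  | cons v t ih =>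
    set cand := -(PySem.Int.floordiv (cut - (p0 + v)) (j0 + 1)) with hcand
    have hstep : bStep cut (j0, p0, some L0) v =
        (j0 + 1, p0 + v, some (if cand > L0 then cand else L0)) := by
      simp only [bStep, hcand]
      split_ifs <;> rfl
    set L1 := if cand > L0 then cand else L0 with hL1
    obtain ⟨L, hfold, hle, hall, hex⟩ := ih (j0 + 1) (p0 + v) L1
    have hcandL : cand ≤ L1 := by rw [hL1]; split_ifs <;> omega
    have hL0L : L0 ≤ L1 := by rw [hL1]; split_ifs <;> omega
    refine ⟨L, ?_, le_trans hL0L hle, ?_, ?_⟩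
    · rw [List.foldl_cons, hstep, hfold]
      simp only [List.length_cons, List.sum_cons, Prod.mk.injEq]
      and_intros <;> first | trivial | (push_cast; ring)
    · intro i hi
      cases i with
      | zero =>
        simp only [List.take_succ_cons, List.take_zero, List.sum_cons, List.sum_nil, add_zero,
          Nat.cast_zero]
        exact le_trans hcandL hle
      | succ i' =>
        have hi' : i' < t.length := by simpa using hi
        have h := hall i' hi'
        have e1 : p0 + v + (t.take (i' + 1)).sum = p0 + (v + (t.take (i' + 1)).sum) := by ring
        have e2 : j0 + 1 + (i' : Int) + 1 = j0 + ((i' : Int) + 1) + 1 := by ring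
        rw [e1, e2] at h
        simp only [List.take_succ_cons, List.sum_cons]
        push_cast
        push_cast at h
        convert h using 4 <;> ring
    · rcases hex with h | ⟨i, hi, he⟩
      · rw [h, hL1]
        split_ifs with hgt
        · right
          refine ⟨0, by simp, ?_⟩
          simp only [List.take_succ_cons, List.take_zero, List.sum_cons, List.sum_nil, add_zero,
            Nat.cast_zero]
          exact hcand
        · left; rfl
      · right
        refine ⟨i + 1, by simpa using hi, ?_⟩
        rw [he]
        simp only [List.take_succ_cons, List.sum_cons]
        push_cast
        congr 2 <;> ring

theorem bFold_full (cut : Int) {s : List Int} (hs : s ≠ []) :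
    ∃ L, s.foldl (bStep cut) (0, 0, none) = ((s.length : Int), s.sum, some L) ∧
      (∀ j : Nat, 1 ≤ j → j ≤ s.length → (s.take j).sum - cut ≤ (j : Int) * L) ∧
      (∃ j : Nat, 1 ≤ j ∧ j ≤ s.length ∧ ((j : Int)) * (L - 1) < (s.take j).sum - cut) := by
  obtain ⟨v, t, rfl⟩ : ∃ v t, s = v :: t := by
    cases s with
    | nil => exact absurd rfl hs
    | cons v t => exact ⟨v, t, rfl⟩
  have hfirst : bStep cut ((0 : Int), (0 : Int), (none : Option Int)) v =
      (1, v, some (-(PySem.Int.floordiv (cut - v) 1))) := by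
    simp [bStep]
  obtain ⟨L, hfold, hle, hall, hex⟩ := bFold_spec cut t 1 v (-(PySem.Int.floordiv (cut - v) 1))
  refine ⟨L, ?_, ?_, ?_⟩
  · rw [List.foldl_cons, hfirst, hfold]
    simp only [List.length_cons, List.sum_cons, Prod.mk.injEq]
    and_intros <;> first | trivial | (push_cast; ring)
  · intro j hj1 hjlen
    cases j with
    | zero => omega
    | succ i =>
      cases i with
      | zero =>
        have hb := cand_bracket (p := v) (cut := cut) (show (0:Int) < 1 by omega)
        simp only [List.take_succ_cons, List.take_zero, List.sum_cons, List.sum_nil, add_zero]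
        push_cast
        nlinarith [hle, hb.2]
      | succ i' =>
        have hi' : i' < t.length := by simpa using hjlen
        have hcle := hall i' hi'
        have hb := cand_bracket (p := v + (t.take (i' + 1)).sum) (cut := cut)
          (show (0:Int) < 1 + (i' : Int) + 1 by push_cast; omega)
        have hmul := mul_le_mul_of_nonneg_right hcle
          (show (0:Int) ≤ 1 + (i' : Int) + 1 by push_cast; omega)
        simp only [List.take_succ_cons, List.sum_cons]
        push_cast
        nlinarith [hb.2, hmul]
  · rcases hex with h | ⟨i, hi, he⟩
    · refine ⟨1, le_refl 1, by simp, ?_⟩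
      have hb := cand_bracket (p := v) (cut := cut) (show (0:Int) < 1 by omega)
      rw [← h] at hb
      simp only [List.take_succ_cons, List.take_zero, List.sum_cons, List.sum_nil, add_zero]
      push_cast
      nlinarith [hb.1]
    · refine ⟨i + 2, by omega, by simpa using hi, ?_⟩
      have hb := cand_bracket (p := v + (t.take (i + 1)).sum) (cut := cut)
        (show (0:Int) < 1 + (i : Int) + 1 by push_cast; omega)
      rw [← he] at hb
      simp only [List.take_succ_cons, List.sum_cons]
      push_cast
      nlinarith [hb.1]

theorem adjust_main (sequences : List (List Int)) (max_len : Int)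
    (hpre : sequences = [] → 0 ≤ max_len) :
    adjust_sequences sequences max_len = adjust_sequences_alt sequences max_len := by
  simp only [adjust_sequences, adjust_sequences_alt]
  set ls := sequences.map (fun seq => (seq.length : Int)) with hls
  by_cases hco : ls.sum - max_len ≤ 0
  · rw [if_pos hco, if_pos hco]
  · rw [if_neg hco, if_neg hco]
    have hseqne : sequences ≠ [] := by
      intro h
      have h0 : ls = [] := by rw [hls, h]; rfl
      rw [h0] at hco
      simp at hco
      have := hpre h
      omega
    have hlsne : ls ≠ [] := by
      intro h
      exact hseqne (List.map_eq_nil_iff.mp (hls ▸ h))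
    set cut := ls.sum - max_len with hcut
    have hcutpos : 0 < cut := by omega
    have hcutnat : (cut.toNat : Int) = cut := Int.toNat_of_nonneg (by omega)
    -- A side: the loop is aStep iterated cut.toNat times
    rw [foldl_ignore, PySem.List.length_pyRange_one, sub_zero]
    obtain ⟨LA, rA, ha0, ha1, hasum, hait⟩ := iterate_wf ls hlsne cut.toNat
    rw [hcutnat] at hasum
    -- B side: the fold yields the water-filling level L
    have hdescne : PySem.List.sorted ls (fun x => x) true ≠ [] := by
      rw [Ne, PySem.List.sorted_eq_nil_iff]; exact hlsne
    obtain ⟨L, hfold, hforall, hexists⟩ := bFold_full cut hdescne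
    rw [hfold]
    have hperm : (PySem.List.sorted ls (fun x => x) true).Perm ls :=
      PySem.List.sorted_perm ls (fun x => x) true
    have hpair : (PySem.List.sorted ls (fun x => x) true).Pairwise (fun a b => b ≤ a) := by
      simpa using PySem.List.sorted_pairwise_rev (xs := ls) (key := fun x => x)
    set desc := PySem.List.sorted ls (fun x => x) true with hdesc
    have hdls : dSum L desc = dSum L ls := dSum_perm hperm L
    have hdls' : dSum (L - 1) desc = dSum (L - 1) ls := dSum_perm hperm (L - 1)
    have hdle : dSum L ls ≤ cut := by
      obtain ⟨j, hj, hdu⟩ := dSum_upper L hpair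
      rcases Nat.eq_zero_or_pos j with hj0 | hj1
      · subst hj0; simp at hdu; omega
      · have := hforall j hj1 hj
        rw [← hdls]; linarith
    have hdgt : cut < dSum (L - 1) ls := by
      obtain ⟨j, hj1, hjlen, hlt⟩ := hexists
      have hlow := dSum_lower (L := L - 1) (s := desc) hjlen
      rw [← hdls']; linarith
    have hcapL := dSum_add_capSum L ls
    have hcapL' := dSum_add_capSum (L - 1) ls
    have hsubL := capSum_sub L ls
    have hrB0 : 0 ≤ capSum L ls - max_len := by omega
    have hrB1 : capSum L ls - max_len < (cntGe L ls : Int) := by omega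
    obtain ⟨hL, hr⟩ := wf_unique ha0 ha1 hrB0 hrB1 (by omega)
    rw [hait, hL, hr]
    rfl

-- ===== VERDICT (by name: the statement is the Claim_ definition above) =====
theorem adjust_sequences_spec : Claim_equal_adjust_sequences := by
  intro sequences max_len _hdom hpre
  exact adjust_main sequences max_len hpre
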